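-- pv_equiv track=rewrite | github.com/lselector/setup_computer | _setup_new_Linux/misc/py_lib/util_states.py | remove_vowels_and_dups
-- ===== SOURCE A (Python) =====
-- def remove_vowels_and_dups(ss):
--     """
--     # remove vowels and repeated characters from string
--     """
--     mylist = []
--     mychar = ""
--     for ch in ss:
--         ch_low = ch.lower()
--         if ch_low in 'aeiou':
--             continue
--         if ch_low == mychar:
--             continue
--         mychar = ch_low
--         mylist.append(ch)
--
--     return "".join(mylist)
-- ===== SOURCE B (Python) =====
-- import re
--
-- def remove_vowels_and_dups(ss):
--     no_vowels = re.sub('(?i)[aeiou]', '', ss)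
--     return re.sub(r'(?is)(.)\1+', r'\1', no_vowels)
-- ===== Notes on version B (the rewrite author's own statement) =====
-- stated objective: alternative
-- what changed: Replaces the manual last-character state machine with two declarative regex substitutions: delete vowels with re.sub('(?i)[aeiou]',''), then collapse case-insensitive duplicate runs with the backreference pattern '(?is)(.)\1+' -> '\1'.
import Mathlib
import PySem

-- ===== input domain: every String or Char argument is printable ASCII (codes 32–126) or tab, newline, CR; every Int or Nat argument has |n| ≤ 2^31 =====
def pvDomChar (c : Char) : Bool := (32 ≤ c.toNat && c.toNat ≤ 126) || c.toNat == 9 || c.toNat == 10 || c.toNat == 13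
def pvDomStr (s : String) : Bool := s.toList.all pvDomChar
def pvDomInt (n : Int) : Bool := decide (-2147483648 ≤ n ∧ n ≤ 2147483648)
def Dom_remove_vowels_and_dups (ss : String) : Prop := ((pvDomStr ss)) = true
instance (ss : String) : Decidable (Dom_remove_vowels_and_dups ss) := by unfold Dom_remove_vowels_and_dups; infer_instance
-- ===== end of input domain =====

-- B replaces A's last-character state machine by two regex substitutions
-- (delete vowels, then collapse case-insensitive duplicate runs); objective: alternative.

-- ===== PORT A =====
-- the state is (mylist, mychar); Python's mychar starts as "" (matching no single
-- char), ported as Option Char with none. `ch_low in 'aeiou'` on a one-char string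
-- is exactly char membership.
def pvStepA (st : List Char × Option Char) (ch : Char) : List Char × Option Char :=
  let chLow := PySem.Chars.lowerChar ch
  if "aeiou".toList.contains chLow then st
  else if some chLow == st.2 then st
  else (st.1 ++ [ch], some chLow)

def remove_vowels_and_dups (ss : String) : String :=
  String.ofList (ss.toList.foldl pvStepA ([], none)).1

-- ===== PORT B =====
-- Hand port of Source B's two re.sub passes (no regex engine in PySem); exact on the
-- ASCII domain. Pass 1, re.sub('(?i)[aeiou]','',s): every char matching the class
-- (case-insensitively) is replaced by '', i.e. a filter. Pass 2,
-- re.sub('(?is)(.)\1+','\1',s): at each position the engine matches the longest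
-- run of chars equal (case-insensitively, DOTALL) to the first one and rewrites
-- it to that first char; chars not starting a run of length ≥ 2 are copied.
def pvSubDupRuns : List Char → List Char
  | [] => []
  | c :: rest =>
      c :: pvSubDupRuns (rest.dropWhile fun d => PySem.Chars.lowerChar d == PySem.Chars.lowerChar c)
termination_by l => l.length
decreasing_by
  exact Nat.lt_succ_of_le (List.length_dropWhile_le _ _)

def remove_vowels_and_dups_alt (ss : String) : String :=
  let noVowels := ss.toList.filter fun ch => !("aeiou".toList.contains (PySem.Chars.lowerChar ch))
  String.ofList (pvSubDupRuns noVowels)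

-- ===== PRECONDITION & SPEC =====
def Spec_remove_vowels_and_dups (ss : String) (out : String) : Prop := out = remove_vowels_and_dups_alt ss
instance (ss : String) (out : String) : Decidable (Spec_remove_vowels_and_dups ss out) := by unfold Spec_remove_vowels_and_dups; infer_instance

-- ===== CLAIM (what is proved, stated in full; the proofs are below) =====
def Claim_equal_remove_vowels_and_dups : Prop := ∀ (ss : String), Dom_remove_vowels_and_dups ss → Spec_remove_vowels_and_dups ss (remove_vowels_and_dups ss)

-- ===== LEMMAS AND PROOFS =====

-- pvDropM mc l: the part of l A's state machine still emits when the last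
-- emitted lowercase char is mc.
def pvDropM : Option Char → List Char → List Char
  | none, l => l
  | some m, l => l.dropWhile fun d => PySem.Chars.lowerChar d == m

theorem pv_foldl_eq (cs : List Char) : ∀ (acc : List Char) (mc : Option Char),
    (cs.foldl pvStepA (acc, mc)).1
    = acc ++ pvSubDupRuns (pvDropM mc
        (cs.filter fun ch => !("aeiou".toList.contains (PySem.Chars.lowerChar ch)))) := by
  induction cs with
  | nil =>
      intro acc mc
      cases mc <;> simp [pvDropM, pvSubDupRuns]
  | cons ch cs ih =>
      intro acc mc
      rw [List.foldl_cons]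
      by_cases hv : "aeiou".toList.contains (PySem.Chars.lowerChar ch) = true
      · have hstep : pvStepA (acc, mc) ch = (acc, mc) := by
          simp only [pvStepA]
          rw [if_pos hv]
        have hc : ¬((!("aeiou".toList.contains (PySem.Chars.lowerChar ch))) = true) := by
          rw [hv]; decide
        rw [hstep, ih, List.filter_cons, if_neg hc]
      · have hv' : ("aeiou".toList.contains (PySem.Chars.lowerChar ch)) = false := by
          simpa using hv
        by_cases hm : (some (PySem.Chars.lowerChar ch) == mc) = true
        · -- skipped duplicate: mc = some (lower ch)
          obtain ⟨m, rfl⟩ : ∃ m, mc = some m := by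
            cases mc with
            | none => simp at hm
            | some m => exact ⟨m, rfl⟩
          have hml : PySem.Chars.lowerChar ch = m := by simpa using hm
          have hstep : pvStepA (acc, some m) ch = (acc, some m) := by
            simp only [pvStepA]
            rw [if_neg (by rw [hv']; decide), if_pos (by simp [hml])]
          have hc : (!("aeiou".toList.contains (PySem.Chars.lowerChar ch))) = true := by
            rw [hv']; decide
          rw [hstep, ih, List.filter_cons, if_pos hc]
          simp only [pvDropM, List.dropWhile_cons, hml]
          rw [if_pos (by simp)]
        · have hm' : (some (PySem.Chars.lowerChar ch) == mc) = false := by simpa using hm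
          have hstep : pvStepA (acc, mc) ch = (acc ++ [ch], some (PySem.Chars.lowerChar ch)) := by
            simp only [pvStepA]
            rw [if_neg (by rw [hv']; decide), if_neg (by simp [hm'])]
          have hc : (!("aeiou".toList.contains (PySem.Chars.lowerChar ch))) = true := by
            rw [hv']; decide
          rw [hstep, ih, List.filter_cons, if_pos hc]
          cases mc with
          | none =>
              simp only [pvDropM]
              rw [pvSubDupRuns]
              simp
          | some m =>
              have hne : (PySem.Chars.lowerChar ch == m) = false := by
                simp at hm' ⊢; exact hm'
              simp only [pvDropM, List.dropWhile_cons]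
              rw [if_neg (by simp [hne])]
              rw [pvSubDupRuns]
              simp

-- ===== VERDICT (by name: the statement is the Claim_ definition above) =====
theorem remove_vowels_and_dups_spec : Claim_equal_remove_vowels_and_dups := by
  intro ss _
  unfold Spec_remove_vowels_and_dups remove_vowels_and_dups remove_vowels_and_dups_alt
  rw [pv_foldl_eq ss.toList [] none]
  rfl
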